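-- pv_equiv track=rewrite | github.com/bc36/leetcode | lc_Python/lc2300_2399.py | countHousePlacements
-- ===== SOURCE A (Python) =====
-- def countHousePlacements(n: int) -> int:
--     ans = 0
--     f = [[0] * 4 for _ in range(n)]
--     f[0][0] = 1  # no left or right
--     f[0][1] = 1  # left
--     f[0][2] = 1  # right
--     f[0][3] = 1  # left and right
--     mod = 10**9 + 7
--     for i in range(1, n):
--         f[i][0] = (f[i - 1][1] + f[i - 1][2] + f[i - 1][3] + f[i - 1][0]) % mod
--         f[i][1] = (f[i - 1][0] + f[i - 1][2]) % mod
--         f[i][2] = (f[i - 1][0] + f[i - 1][1]) % mod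
--         f[i][3] = (f[i - 1][0]) % mod
--     ans = sum(f[-1])
--     return ans % mod
-- ===== SOURCE B (Python) =====
-- def countHousePlacements(n: int) -> int:
--     mod = 10**9 + 7
--
--     def fib_pair(k: int) -> tuple:
--         # (fib(k) % mod, fib(k+1) % mod) by fast doubling
--         if k == 0:
--             return (0, 1)
--         a, b = fib_pair(k // 2)
--         c = (a * (2 * b - a)) % mod
--         d = (a * a + b * b) % mod
--         if k % 2 == 1:
--             return (d, (c + d) % mod)
--         return (c, d)
--
--     f = fib_pair(n + 2)[0]
--     return (f * f) % mod
-- ===== Notes on version B (the rewrite author's own statement) =====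
-- stated objective: faster
-- what changed: Replaces the O(n) four-state DP table with fast-doubling Fibonacci: the answer is fib(n+2)^2 mod 1e9+7, computed in O(log n).
import Mathlib
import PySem

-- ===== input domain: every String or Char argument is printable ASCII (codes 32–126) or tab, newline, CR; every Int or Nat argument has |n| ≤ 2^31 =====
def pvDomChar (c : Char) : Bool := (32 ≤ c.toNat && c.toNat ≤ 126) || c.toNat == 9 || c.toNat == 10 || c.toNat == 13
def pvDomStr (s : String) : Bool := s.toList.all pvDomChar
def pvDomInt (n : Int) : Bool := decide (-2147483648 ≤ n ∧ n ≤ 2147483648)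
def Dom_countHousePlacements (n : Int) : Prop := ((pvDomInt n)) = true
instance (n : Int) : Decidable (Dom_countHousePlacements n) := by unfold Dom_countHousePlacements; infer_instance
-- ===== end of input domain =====

-- B replaces A's O(n) four-state DP table with fast-doubling Fibonacci (answer = fib(n+2)^2 mod 1e9+7), O(log n).


-- ===== PORT A =====
-- the loop `for i in range(1, n)`, state = the whole table f (rows are 4-tuples f[i][0..3])
def pvLoopA (n i : Nat) (f : List (Int × Int × Int × Int)) : List (Int × Int × Int × Int) :=
  if i < n then
    let p := f.getD (i - 1) (0, 0, 0, 0)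
    pvLoopA n (i + 1) (f.set i
      (PySem.Int.mod (p.2.1 + p.2.2.1 + p.2.2.2 + p.1) 1000000007,
       PySem.Int.mod (p.1 + p.2.2.1) 1000000007,
       PySem.Int.mod (p.1 + p.2.1) 1000000007,
       PySem.Int.mod p.1 1000000007))
  else f
termination_by n - i

def countHousePlacements (n : Int) : Int :=
  let f := List.replicate n.toNat ((0:Int), (0:Int), (0:Int), (0:Int))  -- [[0]*4 for _ in range(n)]
  let f := f.set 0 (1, 1, 1, 1)          -- the four assignments f[0][j] = 1 (Pre_ guarantees row 0 exists)
  let f := pvLoopA n.toNat 1 f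
  let last := (PySem.List.pyGet? f (-1)).getD (0, 0, 0, 0)  -- f[-1]
  PySem.Int.mod (last.1 + last.2.1 + last.2.2.1 + last.2.2.2) 1000000007  -- sum(f[-1]) % mod

-- ===== PORT B =====
-- fast doubling: (fib k, fib (k+1)) mod 1e9+7
def pvFibPair (k : Nat) : Int × Int :=
  if h : k = 0 then (0, 1)
  else
    let ab := pvFibPair (k / 2)
    let c := PySem.Int.mod (ab.1 * (2 * ab.2 - ab.1)) 1000000007
    let d := PySem.Int.mod (ab.1 * ab.1 + ab.2 * ab.2) 1000000007
    if k % 2 = 1 then (d, PySem.Int.mod (c + d) 1000000007) else (c, d)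
termination_by k
decreasing_by exact Nat.div_lt_self (Nat.pos_of_ne_zero h) (by norm_num)

def countHousePlacements_alt (n : Int) : Int :=
  let f := (pvFibPair (n + 2).toNat).1
  PySem.Int.mod (f * f) 1000000007

-- ===== PRECONDITION & SPEC =====
-- Pre_ excludes n ≤ 0, where A raises IndexError (f[0][0] = 1 on an empty table).
def Pre_countHousePlacements (n : Int) : Prop := 1 ≤ n
instance (n : Int) : Decidable (Pre_countHousePlacements n) := by unfold Pre_countHousePlacements; infer_instance
def pvWitness_countHousePlacements : Int := 3

def Spec_countHousePlacements (n : Int) (out : Int) : Prop := out = countHousePlacements_alt n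
instance (n : Int) (out : Int) : Decidable (Spec_countHousePlacements n out) := by unfold Spec_countHousePlacements; infer_instance

-- ===== CLAIM (what is proved, stated in full; the proofs are below) =====
def Claim_equal_countHousePlacements : Prop := ∀ (n : Int), Dom_countHousePlacements n → Pre_countHousePlacements n → Spec_countHousePlacements n (countHousePlacements n)

-- ===== LEMMAS AND PROOFS =====

-- pure image of A's row i (the same step as pvLoopA applies)
def pvRow : Nat → Int × Int × Int × Int
  | 0 => (1, 1, 1, 1)
  | k + 1 =>
    let p := pvRow k
    (PySem.Int.mod (p.2.1 + p.2.2.1 + p.2.2.2 + p.1) 1000000007,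
     PySem.Int.mod (p.1 + p.2.2.1) 1000000007,
     PySem.Int.mod (p.1 + p.2.1) 1000000007,
     PySem.Int.mod p.1 1000000007)

theorem pvMod_eq (a : Int) : PySem.Int.mod a 1000000007 = a % 1000000007 :=
  PySem.Int.mod_eq_emod_of_pos (by norm_num)

theorem pvMod_bounds (a : Int) : 0 ≤ PySem.Int.mod a 1000000007 ∧ PySem.Int.mod a 1000000007 < 1000000007 := by
  rw [pvMod_eq]
  exact ⟨Int.emod_nonneg a (by norm_num), Int.emod_lt_of_pos a (by norm_num)⟩

theorem pvCast_mod (a : Int) : ((PySem.Int.mod a 1000000007 : Int) : ZMod 1000000007) = (a : ZMod 1000000007) := by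
  rw [pvMod_eq]
  exact_mod_cast ZMod.intCast_mod a 1000000007

theorem pvCast_inj (x y : Int) (hx : 0 ≤ x) (hx2 : x < 1000000007) (hy : 0 ≤ y) (hy2 : y < 1000000007)
    (h : (x : ZMod 1000000007) = (y : ZMod 1000000007)) : x = y := by
  rw [ZMod.intCast_eq_intCast_iff] at h
  have h' : x % (1000000007 : Int) = y % (1000000007 : Int) := by exact_mod_cast h
  rw [Int.emod_eq_of_lt hx hx2, Int.emod_eq_of_lt hy hy2] at h'
  exact h'

-- cast of the fast-doubling pair is the Fibonacci pair in ZMod 1e9+7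
theorem pvFibPair_cast (k : Nat) :
    (((pvFibPair k).1 : ZMod 1000000007) = (Nat.fib k : ZMod 1000000007)) ∧
    (((pvFibPair k).2 : ZMod 1000000007) = (Nat.fib (k + 1) : ZMod 1000000007)) := by
  induction k using Nat.strong_induction_on with
  | _ k ih =>
    by_cases hk : k = 0
    · subst hk; simp [pvFibPair]
    · obtain ⟨h1, h2⟩ := ih (k / 2) (Nat.div_lt_self (Nat.pos_of_ne_zero hk) (by norm_num))
      have hsub : Nat.fib (k / 2) ≤ 2 * Nat.fib (k / 2 + 1) := by
        have := Nat.fib_le_fib_succ (n := k / 2); omega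
      have hc : (((PySem.Int.mod ((pvFibPair (k / 2)).1 * (2 * (pvFibPair (k / 2)).2 - (pvFibPair (k / 2)).1)) 1000000007 : Int) : ZMod 1000000007))
          = (Nat.fib (2 * (k / 2)) : ZMod 1000000007) := by
        rw [pvCast_mod, Nat.fib_two_mul, Nat.cast_mul, Nat.cast_sub hsub]
        push_cast [h1, h2]; ring
      have hd : (((PySem.Int.mod ((pvFibPair (k / 2)).1 * (pvFibPair (k / 2)).1 + (pvFibPair (k / 2)).2 * (pvFibPair (k / 2)).2) 1000000007 : Int) : ZMod 1000000007))
          = (Nat.fib (2 * (k / 2) + 1) : ZMod 1000000007) := by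
        rw [pvCast_mod, Nat.fib_two_mul_add_one]
        push_cast [h1, h2]; ring
      rw [pvFibPair, dif_neg hk]
      by_cases hodd : k % 2 = 1
      · have hk2 : 2 * (k / 2) + 1 = k := by omega
        simp only [if_pos hodd]
        refine ⟨by rw [hk2] at hd; exact hd, ?_⟩
        rw [pvCast_mod, Int.cast_add, hc, hd]
        have hk3 : k + 1 = 2 * (k / 2) + 1 + 1 := by omega
        rw [hk3]
        have := Nat.fib_add_two (n := 2 * (k / 2))
        rw [show 2 * (k / 2) + 2 = 2 * (k / 2) + 1 + 1 from rfl] at this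
        rw [this]
        push_cast; ring
      · have hk2 : 2 * (k / 2) = k := by omega
        simp only [if_neg hodd]
        rw [hk2] at hc hd
        exact ⟨hc, hd⟩

-- cast of A's row k: products of Fibonacci numbers (one-side DP squared)
theorem pvRow_cast (k : Nat) :
    (((pvRow k).1 : ZMod 1000000007) = (Nat.fib (k + 2) : ZMod 1000000007) * (Nat.fib (k + 2) : ZMod 1000000007)) ∧
    (((pvRow k).2.1 : ZMod 1000000007) = (Nat.fib (k + 2) : ZMod 1000000007) * (Nat.fib (k + 1) : ZMod 1000000007)) ∧
    (((pvRow k).2.2.1 : ZMod 1000000007) = (Nat.fib (k + 2) : ZMod 1000000007) * (Nat.fib (k + 1) : ZMod 1000000007)) ∧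
    (((pvRow k).2.2.2 : ZMod 1000000007) = (Nat.fib (k + 1) : ZMod 1000000007) * (Nat.fib (k + 1) : ZMod 1000000007)) := by
  induction k with
  | zero => simp [pvRow]
  | succ k ih =>
    obtain ⟨i0, i1, i2, i3⟩ := ih
    have hf : (Nat.fib (k + 3) : ZMod 1000000007) = (Nat.fib (k + 1) : ZMod 1000000007) + (Nat.fib (k + 2) : ZMod 1000000007) := by
      have := Nat.fib_add_two (n := k + 1); exact_mod_cast congrArg (Nat.cast : Nat → ZMod 1000000007) this
    refine ⟨?_, ?_, ?_, ?_⟩ <;>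
      · show ((PySem.Int.mod _ 1000000007 : Int) : ZMod 1000000007) = _
        rw [pvCast_mod]
        push_cast [i0, i1, i2, i3, hf]
        ring

-- pvLoopA preserves length
theorem pvLoopA_length (j : Nat) : ∀ (n i : Nat) (f : List (Int × Int × Int × Int)),
    n - i ≤ j → (pvLoopA n i f).length = f.length := by
  induction j with
  | zero =>
    intro n i f hj
    rw [pvLoopA, if_neg (by omega)]
  | succ j ih =>
    intro n i f hj
    rw [pvLoopA]
    split_ifs with h
    · rw [ih n (i + 1) _ (by omega), List.length_set]
    · rfl

-- loop invariant: the row just written equals pvRow, so the final row is pvRow (n-1)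
theorem pvLoopA_spec (j : Nat) : ∀ (n i : Nat) (f : List (Int × Int × Int × Int)),
    n - i ≤ j → 1 ≤ i → i ≤ n → f.length = n →
    f.getD (i - 1) (0, 0, 0, 0) = pvRow (i - 1) →
    (pvLoopA n i f).getD (n - 1) (0, 0, 0, 0) = pvRow (n - 1) := by
  induction j with
  | zero =>
    intro n i f hj h1 h2 hlen hrow
    rw [pvLoopA, if_neg (by omega)]
    have : i = n := by omega
    subst this; exact hrow
  | succ j ih =>
    intro n i f hj h1 h2 hlen hrow
    rw [pvLoopA]
    split_ifs with h
    · refine ih n (i + 1) _ (by omega) (by omega) (by omega) (by rw [List.length_set]; exact hlen) ?_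
      have hi : i < f.length := by omega
      have hget : (f.set i
          (PySem.Int.mod ((f.getD (i - 1) (0,0,0,0)).2.1 + (f.getD (i - 1) (0,0,0,0)).2.2.1 + (f.getD (i - 1) (0,0,0,0)).2.2.2 + (f.getD (i - 1) (0,0,0,0)).1) 1000000007,
           PySem.Int.mod ((f.getD (i - 1) (0,0,0,0)).1 + (f.getD (i - 1) (0,0,0,0)).2.2.1) 1000000007,
           PySem.Int.mod ((f.getD (i - 1) (0,0,0,0)).1 + (f.getD (i - 1) (0,0,0,0)).2.1) 1000000007,
           PySem.Int.mod (f.getD (i - 1) (0,0,0,0)).1 1000000007)).getD (i + 1 - 1) (0,0,0,0)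
          = pvRow (i + 1 - 1) := by
        have hidx : i + 1 - 1 = i := by omega
        rw [hidx, List.getD, List.getElem?_set_self (by simpa using hi), Option.getD_some]
        have hi1 : i - 1 + 1 = i := by omega
        rw [hrow, ← hi1, pvRow]
        simp only [Nat.add_sub_cancel]
      exact hget
    · have : i = n := by omega
      subst this; exact hrow

-- ===== VERDICT (by name: the statement is the Claim_ definition above) =====
theorem countHousePlacements_spec : Claim_equal_countHousePlacements := by
  intro n _ hpre
  unfold Pre_countHousePlacements at hpre
  unfold Spec_countHousePlacements
  have hN : 1 ≤ n.toNat := by omega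
  -- A's value: last row of the table is pvRow (n.toNat - 1)
  have hlen0 : ((List.replicate n.toNat ((0:Int), (0:Int), (0:Int), (0:Int))).set 0 (1, 1, 1, 1)).length = n.toNat := by
    simp
  have hrow0 : ((List.replicate n.toNat ((0:Int), (0:Int), (0:Int), (0:Int))).set 0 (1, 1, 1, 1)).getD 0 (0, 0, 0, 0) = pvRow (1 - 1) := by
    rw [List.getD, List.getElem?_set_self (by simp; omega), Option.getD_some]
    rfl
  have hloop := pvLoopA_spec n.toNat n.toNat 1
    ((List.replicate n.toNat ((0:Int), (0:Int), (0:Int), (0:Int))).set 0 (1, 1, 1, 1))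
    (by omega) (by omega) hN hlen0 hrow0
  have hlen := pvLoopA_length n.toNat n.toNat 1
    ((List.replicate n.toNat ((0:Int), (0:Int), (0:Int), (0:Int))).set 0 (1, 1, 1, 1)) (by omega)
  rw [hlen0] at hlen
  have hlast : (PySem.List.pyGet? (pvLoopA n.toNat 1
      ((List.replicate n.toNat ((0:Int), (0:Int), (0:Int), (0:Int))).set 0 (1, 1, 1, 1))) (-1)).getD (0, 0, 0, 0)
      = pvRow (n.toNat - 1) := by
    rw [PySem.List.pyGet?_neg_one, List.getLast?_eq_getElem?, hlen, ← hloop, List.getD]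
  have hA : countHousePlacements n = PySem.Int.mod
      ((pvRow (n.toNat - 1)).1 + (pvRow (n.toNat - 1)).2.1 + (pvRow (n.toNat - 1)).2.2.1 + (pvRow (n.toNat - 1)).2.2.2) 1000000007 := by
    simp only [countHousePlacements]
    rw [hlast]
  have hB : countHousePlacements_alt n = PySem.Int.mod
      ((pvFibPair (n.toNat + 2)).1 * (pvFibPair (n.toNat + 2)).1) 1000000007 := by
    simp only [countHousePlacements_alt]
    rw [show (n + 2).toNat = n.toNat + 2 from by omega]
  rw [hA, hB]
  apply pvCast_inj _ _ (pvMod_bounds _).1 (pvMod_bounds _).2 (pvMod_bounds _).1 (pvMod_bounds _).2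
  rw [pvCast_mod, pvCast_mod]
  obtain ⟨r0, r1, r2, r3⟩ := pvRow_cast (n.toNat - 1)
  obtain ⟨p1, _⟩ := pvFibPair_cast (n.toNat + 2)
  simp only [show n.toNat - 1 + 2 = n.toNat + 1 from by omega, show n.toNat - 1 + 1 = n.toNat from by omega] at r0 r1 r2 r3
  push_cast [r0, r1, r2, r3, p1]
  rw [Nat.fib_add_two (n := n.toNat)]
  push_cast
  ring
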